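-- pv_equiv track=rewrite | github.com/tcq1/pds | 07_association_rule_mining/07_quoc_trung_chu.py | get_vertical_layout
-- ===== SOURCE A (Python) =====
-- def get_vertical_layout(items, dataset):
--     """ Make the initially horizontal layout vertical
--
--     :param items: list of items
--     :param dataset: np array with all transactions
--     """
--     item_dict = {}
--     for item in items:
--         transactions = set()
--         for i in range(len(dataset)):
--             if item in dataset[i]:
--                 transactions.add(i)
--         item_dict[item] = transactions
--
--     return item_dict
-- ===== SOURCE B (Python) =====
-- def get_vertical_layout(items, dataset):
--     """ Make the initially horizontal layout vertical
--
--     :param items: list of items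
--     :param dataset: np array with all transactions
--     """
--     index = {item: set() for item in items}
--     for i, transaction in enumerate(dataset):
--         for x in transaction:
--             if x in index:
--                 index[x].add(i)
--     return index
-- ===== Notes on version B (the rewrite author's own statement) =====
-- stated objective: faster
-- what changed: Instead of scanning the whole dataset once per item (nested item->transaction->membership loops), B makes a single pass over the dataset, adding each transaction index to the set of every item it contains via one dict lookup.
import Mathlib
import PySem

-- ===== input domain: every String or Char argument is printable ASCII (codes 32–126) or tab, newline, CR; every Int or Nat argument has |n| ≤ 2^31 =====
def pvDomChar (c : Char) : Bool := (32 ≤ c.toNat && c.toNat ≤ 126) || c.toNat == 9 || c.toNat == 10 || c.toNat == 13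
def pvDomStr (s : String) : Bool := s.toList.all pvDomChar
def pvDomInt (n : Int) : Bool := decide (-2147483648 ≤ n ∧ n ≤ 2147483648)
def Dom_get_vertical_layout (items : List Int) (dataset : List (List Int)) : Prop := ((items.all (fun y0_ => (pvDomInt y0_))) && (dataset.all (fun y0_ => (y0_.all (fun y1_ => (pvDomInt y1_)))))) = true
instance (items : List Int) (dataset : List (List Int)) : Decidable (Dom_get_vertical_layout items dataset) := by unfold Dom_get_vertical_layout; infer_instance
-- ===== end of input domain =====

-- B replaces A's per-item scan of the whole dataset by a single pass over the
-- dataset that adds each transaction index to the set of every contained item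
-- (objective: faster — one pass instead of |items| passes).

-- ===== PORT A =====
-- for each item, scan all transaction indices and collect those whose transaction contains it
def get_vertical_layout (items : List Int) (dataset : List (List Int)) : List (Int × List Int) :=
  (items.foldl (fun d item =>
      d.insert item
        ((PySem.List.pyRange 0 (PySem.List.len dataset) 1).foldl
          (fun transactions i =>
            if item ∈ PySem.List.pyGetD dataset i [] then
              PySem.Set.add transactions i
            else transactions)
          PySem.Set.empty))
    PySem.Dict.empty).items

-- ===== PORT B =====
-- dict of empty sets over items, then one pass over enumerate(dataset)
def get_vertical_layout_alt (items : List Int) (dataset : List (List Int)) : List (Int × List Int) :=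
  ((PySem.List.enumerate dataset 0).foldl
      (fun d p =>
        p.2.foldl
          (fun d x =>
            if d.contains x then d.modify x PySem.Set.empty (fun s => PySem.Set.add s p.1)
            else d)
          d)
      (items.foldl (fun d item => d.insert item PySem.Set.empty) PySem.Dict.empty)).items

-- ===== PRECONDITION & SPEC =====
def Spec_get_vertical_layout (items : List Int) (dataset : List (List Int)) (out : List (Int × List Int)) : Prop := out = get_vertical_layout_alt items dataset
instance (items : List Int) (dataset : List (List Int)) (out : List (Int × List Int)) : Decidable (Spec_get_vertical_layout items dataset out) := by unfold Spec_get_vertical_layout; infer_instance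

-- ===== CLAIM (what is proved, stated in full; the proofs are below) =====
def Claim_equal_get_vertical_layout : Prop := ∀ (items : List Int) (dataset : List (List Int)), Dom_get_vertical_layout items dataset → Spec_get_vertical_layout items dataset (get_vertical_layout items dataset)

-- ===== LEMMAS AND PROOFS =====

-- a foldl of inserts whose value depends only on the key: lookup yields that value
theorem pv_getD_foldl_insert_fun (v : Int → PySem.Set Int) :
    ∀ (l : List Int) (d : PySem.Dict Int (PySem.Set Int)) (k : Int),
    (l.foldl (fun d it => d.insert it (v it)) d).getD k PySem.Set.empty =
      if k ∈ l then v k else d.getD k PySem.Set.empty := by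
  intro l
  induction l with
  | nil => intro d k; simp
  | cons a l ih =>
    intro d k
    simp only [List.foldl_cons, ih, List.mem_cons, PySem.Dict.getD_insert]
    by_cases h : k ∈ l
    · simp [h]
    · by_cases hk : k = a <;> simp [h, hk]

-- B's inner loop (one transaction) never changes the key list
theorem pv_keys_inner (i : Int) :
    ∀ (txn : List Int) (d : PySem.Dict Int (PySem.Set Int)),
    (txn.foldl (fun d x =>
        if d.contains x then d.modify x PySem.Set.empty (fun s => PySem.Set.add s i) else d)
      d).keys = d.keys := by
  intro txn
  induction txn with
  | nil => intro d; rfl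
  | cons x rest ih =>
    intro d
    simp only [List.foldl_cons]
    by_cases h : d.contains x = true
    · rw [ih, h, if_pos rfl, PySem.Dict.keys_modify, PySem.Dict.keys_insert_of_contains]
      simpa using h
    · rw [if_neg h, ih]

-- hence membership tests are invariant across the inner loop
theorem pv_contains_inner (i : Int) (txn : List Int) (d : PySem.Dict Int (PySem.Set Int)) (c : Int) :
    (txn.foldl (fun d x =>
        if d.contains x then d.modify x PySem.Set.empty (fun s => PySem.Set.add s i) else d)
      d).contains c = d.contains c := by
  rw [PySem.Dict.contains_eq_decide_mem_keys, PySem.Dict.contains_eq_decide_mem_keys,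
    pv_keys_inner]

-- value of one key after B's inner loop
theorem pv_getD_inner (i : Int) :
    ∀ (txn : List Int) (d : PySem.Dict Int (PySem.Set Int)) (k : Int),
    (txn.foldl (fun d x =>
        if d.contains x then d.modify x PySem.Set.empty (fun s => PySem.Set.add s i) else d)
      d).getD k PySem.Set.empty =
      if d.contains k = true ∧ k ∈ txn then PySem.Set.add (d.getD k PySem.Set.empty) i
      else d.getD k PySem.Set.empty := by
  intro txn
  induction txn with
  | nil => intro d k; simp
  | cons x rest ih =>
    intro d k
    simp only [List.foldl_cons]
    by_cases hkx : k = x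
    · subst hkx
      by_cases hc : d.contains k = true
      · rw [hc, if_pos rfl, ih]
        have hc' : (d.modify k PySem.Set.empty (fun s => PySem.Set.add s i)).contains k = true := by
          simp [PySem.Dict.contains_modify]
        rw [hc', PySem.Dict.getD_modify_self]
        by_cases hr : k ∈ rest
        · simp only [hr, and_true, List.mem_cons, true_or]
          exact PySem.Set.add_of_mem ((PySem.Set.mem_add _ i i).mpr (Or.inr rfl))
        · simp [hr]
      · rw [if_neg hc, ih]
        simp [hc]
    · by_cases hc : d.contains x = true
      · rw [hc, if_pos rfl, ih, PySem.Dict.getD_modify, if_neg hkx]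
        have : (d.modify x PySem.Set.empty (fun s => PySem.Set.add s i)).contains k = d.contains k := by
          simp [PySem.Dict.contains_modify, hkx]
        rw [this]
        simp [List.mem_cons, hkx]
      · rw [if_neg hc, ih]
        simp [List.mem_cons, hkx]

-- B's outer loop never changes the key list
theorem pv_keys_outer :
    ∀ (ps : List (Int × List Int)) (d : PySem.Dict Int (PySem.Set Int)),
    (ps.foldl (fun d p =>
        p.2.foldl (fun d x =>
          if d.contains x then d.modify x PySem.Set.empty (fun s => PySem.Set.add s p.1) else d)
          d)
      d).keys = d.keys := by
  intro ps
  induction ps with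
  | nil => intro d; rfl
  | cons p ps ih => intro d; rw [List.foldl_cons, ih, pv_keys_inner]

-- value of one key after B's outer loop, as a fold over the (index, transaction) pairs
theorem pv_getD_outer :
    ∀ (ps : List (Int × List Int)) (d : PySem.Dict Int (PySem.Set Int)) (k : Int),
    (ps.foldl (fun d p =>
        p.2.foldl (fun d x =>
          if d.contains x then d.modify x PySem.Set.empty (fun s => PySem.Set.add s p.1) else d)
          d)
      d).getD k PySem.Set.empty =
      if d.contains k = true then
        ps.foldl (fun acc p => if k ∈ p.2 then PySem.Set.add acc p.1 else acc)
          (d.getD k PySem.Set.empty)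
      else d.getD k PySem.Set.empty := by
  intro ps
  induction ps with
  | nil => intro d k; simp
  | cons p ps ih =>
    intro d k
    simp only [List.foldl_cons]
    rw [ih, pv_contains_inner, pv_getD_inner]
    by_cases hc : d.contains k = true
    · simp [hc]
    · simp [hc]

-- items of a fold of inserts whose value depends only on the key
theorem pv_items_foldl_insert_fun (v : Int → PySem.Set Int) (items : List Int) :
    (items.foldl (fun d it => d.insert it (v it)) PySem.Dict.empty).items =
      (PySem.Set.ofList items).map (fun k => (k, v k)) := by
  have hnd : (items.foldl (fun d it => d.insert it (v it)) PySem.Dict.empty).keys.Nodup :=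
    PySem.Dict.nodup_keys_foldl_insert items (fun _ it => v it) PySem.Dict.empty (by simp)
  rw [PySem.Dict.items_eq_map_keys _ hnd PySem.Set.empty,
    PySem.Dict.keys_foldl_insert items (fun _ it => v it) PySem.Dict.empty]
  simp only [PySem.Dict.keys_empty, PySem.Set.update_nil_left]
  apply List.map_congr_left
  intro k hk
  rw [pv_getD_foldl_insert_fun v items PySem.Dict.empty k,
    if_pos ((PySem.Set.mem_ofList items k).mp hk)]

-- items of B's whole computation, as a map over the distinct items
theorem pv_items_B (items : List Int) (ps : List (Int × List Int)) :
    (ps.foldl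
        (fun d p =>
          p.2.foldl (fun d x =>
            if d.contains x then d.modify x PySem.Set.empty (fun s => PySem.Set.add s p.1) else d)
            d)
        (items.foldl (fun d item => d.insert item PySem.Set.empty) PySem.Dict.empty)).items =
      (PySem.Set.ofList items).map (fun k =>
        (k, ps.foldl (fun acc p => if k ∈ p.2 then PySem.Set.add acc p.1 else acc)
              PySem.Set.empty)) := by
  have hK0 : (items.foldl (fun d item => d.insert item (PySem.Set.empty : PySem.Set Int))
      PySem.Dict.empty).keys = PySem.Set.ofList items := by
    rw [PySem.Dict.keys_foldl_insert items (fun _ _ => PySem.Set.empty) PySem.Dict.empty]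
    simp only [PySem.Dict.keys_empty, PySem.Set.update_nil_left]
  have hnd : (ps.foldl
      (fun d p =>
        p.2.foldl (fun d x =>
          if d.contains x then d.modify x PySem.Set.empty (fun s => PySem.Set.add s p.1) else d)
          d)
      (items.foldl (fun d item => d.insert item PySem.Set.empty) PySem.Dict.empty)).keys.Nodup := by
    rw [pv_keys_outer, hK0]; exact PySem.Set.nodup_ofList items
  rw [PySem.Dict.items_eq_map_keys _ hnd PySem.Set.empty, pv_keys_outer, hK0]
  apply List.map_congr_left
  intro k hk
  have hc : (items.foldl (fun d item => d.insert item (PySem.Set.empty : PySem.Set Int))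
      PySem.Dict.empty).contains k = true := by
    rw [PySem.Dict.contains_eq_decide_mem_keys, hK0]; simpa using hk
  rw [pv_getD_outer, hc, if_pos rfl,
    pv_getD_foldl_insert_fun (fun _ => PySem.Set.empty) items PySem.Dict.empty k]
  simp [(PySem.Set.mem_ofList items k).mp hk]

-- ===== VERDICT (by name: the statement is the Claim_ definition above) =====
theorem get_vertical_layout_spec : Claim_equal_get_vertical_layout := by
  intro items dataset _
  unfold Spec_get_vertical_layout get_vertical_layout get_vertical_layout_alt
  refine Eq.trans ?_ (pv_items_B items (PySem.List.enumerate dataset 0)).symm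
  refine Eq.trans (pv_items_foldl_insert_fun (fun item =>
      (PySem.List.pyRange 0 (PySem.List.len dataset) 1).foldl
        (fun transactions i =>
          if item ∈ PySem.List.pyGetD dataset i [] then PySem.Set.add transactions i
          else transactions)
        PySem.Set.empty) items) ?_
  apply List.map_congr_left
  intro k _
  rw [PySem.List.enumerate_eq_map_pyRange dataset [], List.foldl_map]
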